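-- pv_equiv track=rewrite | github.com/BehlurOlderys/Enkoder | processing/line_fitter.py | split_vertically_by_threshold
-- ===== SOURCE A (Python) =====
-- def split_vertically_by_threshold(data, threshold, raw_data=None):
--     """
--     Split data into continuous parts lying above and under threshold
--     :param raw_data: data that will actually be sampled (default = same as data)
--     :param data:
--     :param threshold:
--     :return: crossings is array of indices where crossing above/under threshold occurs
--     """
--     if raw_data is not None:
--         raw_data = data
--     crossings = []
--     hills = []
--     current_hill = []
--
--     direction = "minus" if data[0] < threshold else "plus"
--
--     p_index = 0
--     for p in data:
--         current_hill.append(raw_data[p_index])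
--         if direction == "minus":
--             if p > threshold:
--                 direction = "plus"
--                 crossings.append(p_index)
--                 hills.append(current_hill.copy())
--                 current_hill = []
--         elif direction == "plus":
--             if p < threshold:
--                 direction = "minus"
--                 crossings.append(p_index)
--                 hills.append(current_hill.copy())
--                 current_hill = []
--         p_index += 1
--     hills.append(current_hill.copy())
--     return crossings, hills
-- ===== SOURCE B (Python) =====
-- def split_vertically_by_threshold(data, threshold, raw_data=None):
--     if raw_data is not None:
--         raw_data = data
--     direction = "minus" if data[0] < threshold else "plus"
--     crossings = []
--     i = 0
--     for p in data:
--         if direction == "minus" and p > threshold: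
--             direction = "plus"
--             crossings.append(i)
--         elif direction == "plus" and p < threshold:
--             direction = "minus"
--             crossings.append(i)
--         i += 1
--     hills = []
--     prev = 0
--     for c in crossings:
--         hills.append(raw_data[prev:c + 1])
--         prev = c + 1
--     hills.append(raw_data[prev:])
--     return crossings, hills
-- ===== Notes on version B (the rewrite author's own statement) =====
-- stated objective: alternative
-- what changed: B first runs the direction state machine collecting only the crossing indices, then reconstructs the hills afterwards by slicing at the crossing boundaries instead of accumulating a current_hill element by element inside the loop.
import Mathlib
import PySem

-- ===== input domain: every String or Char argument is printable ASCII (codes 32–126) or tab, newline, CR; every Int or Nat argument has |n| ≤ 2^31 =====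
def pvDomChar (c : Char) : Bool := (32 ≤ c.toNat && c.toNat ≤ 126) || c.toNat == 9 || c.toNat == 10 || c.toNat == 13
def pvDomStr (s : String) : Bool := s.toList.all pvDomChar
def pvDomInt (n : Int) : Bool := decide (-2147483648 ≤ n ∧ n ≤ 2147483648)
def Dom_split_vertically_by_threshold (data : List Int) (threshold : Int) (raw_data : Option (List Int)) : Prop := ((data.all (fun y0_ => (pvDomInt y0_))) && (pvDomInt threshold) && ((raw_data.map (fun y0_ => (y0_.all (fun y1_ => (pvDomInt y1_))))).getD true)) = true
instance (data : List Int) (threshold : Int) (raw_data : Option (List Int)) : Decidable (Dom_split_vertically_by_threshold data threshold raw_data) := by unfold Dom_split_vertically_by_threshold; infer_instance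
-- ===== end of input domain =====

-- B collects the crossing indices first and then builds the hills by slicing at the
-- crossing boundaries, instead of A's element-by-element current_hill accumulation;
-- same cost, different decomposition.

-- ===== PORT A =====
-- loop body of A's single for-loop; state = (crossings, hills, current_hill, direction, p_index)
def pvStepA (rd : List Int) (t : Int)
    (st : List Int × List (List Int) × List Int × String × Int) (p : Int) :
    List Int × List (List Int) × List Int × String × Int :=
  let cr := st.1; let hl := st.2.1; let ch := st.2.2.1; let dir := st.2.2.2.1; let i := st.2.2.2.2
  let ch := ch ++ [PySem.List.pyGetD rd i 0]
  if dir == "minus" then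
    if p > t then (cr ++ [i], hl ++ [ch], ([] : List Int), "plus", i + 1)
    else (cr, hl, ch, dir, i + 1)
  else if dir == "plus" then
    if p < t then (cr ++ [i], hl ++ [ch], ([] : List Int), "minus", i + 1)
    else (cr, hl, ch, dir, i + 1)
  else (cr, hl, ch, dir, i + 1)

def split_vertically_by_threshold (data : List Int) (threshold : Int) (raw_data : Option (List Int)) : List Int × List (List Int) :=
  match data, raw_data with
  | [], _ => ([], [])        -- data[0] raises IndexError (outside Pre_)
  | _, none => ([], [])      -- raw_data[p_index] on None raises TypeError (outside Pre_)
  | d0 :: _, some _ =>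
    let rd := data           -- 'if raw_data is not None: raw_data = data'
    let dir0 := if d0 < threshold then "minus" else "plus"
    let st := data.foldl (pvStepA rd threshold)
      (([] : List Int), ([] : List (List Int)), ([] : List Int), dir0, (0 : Int))
    (st.1, st.2.1 ++ [st.2.2.1])

-- ===== PORT B =====
-- first loop of B: state = (crossings, direction, i)
def pvStepB (t : Int) (st : List Int × String × Int) (p : Int) : List Int × String × Int :=
  let cr := st.1; let dir := st.2.1; let i := st.2.2
  if dir == "minus" && decide (p > t) then (cr ++ [i], "plus", i + 1)
  else if dir == "plus" && decide (p < t) then (cr ++ [i], "minus", i + 1)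
  else (cr, dir, i + 1)

-- second loop of B: state = (hills, prev)
def pvStepH (rd : List Int) (st : List (List Int) × Int) (c : Int) : List (List Int) × Int :=
  (st.1 ++ [PySem.List.slice rd (some st.2) (some (c + 1))], c + 1)

def split_vertically_by_threshold_alt (data : List Int) (threshold : Int) (raw_data : Option (List Int)) : List Int × List (List Int) :=
  match data, raw_data with
  | [], _ => ([], [])        -- data[0] raises IndexError (outside Pre_)
  | _, none => ([], [])      -- raw_data[prev:...] on None raises TypeError (outside Pre_)
  | d0 :: _, some _ =>
    let rd := data           -- 'if raw_data is not None: raw_data = data'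
    let dir0 := if d0 < threshold then "minus" else "plus"
    let st := data.foldl (pvStepB threshold) (([] : List Int), dir0, (0 : Int))
    let crossings := st.1
    let hp := crossings.foldl (pvStepH rd) (([] : List (List Int)), (0 : Int))
    (crossings, hp.1 ++ [PySem.List.slice rd (some hp.2) none])

-- ===== PRECONDITION & SPEC =====
-- Pre_ excludes exactly the inputs on which A raises: empty data (IndexError on data[0])
-- and raw_data = None (TypeError subscripting None); B raises there too.
def Pre_split_vertically_by_threshold (data : List Int) (threshold : Int) (raw_data : Option (List Int)) : Prop :=
  data ≠ [] ∧ raw_data.isSome = true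
instance (data : List Int) (threshold : Int) (raw_data : Option (List Int)) : Decidable (Pre_split_vertically_by_threshold data threshold raw_data) := by unfold Pre_split_vertically_by_threshold; infer_instance

def pvWitness_split_vertically_by_threshold : List Int × Int × Option (List Int) := ([1, 5, 2], 3, some [1, 5, 2])

def Spec_split_vertically_by_threshold (data : List Int) (threshold : Int) (raw_data : Option (List Int)) (out : List Int × List (List Int)) : Prop := out = split_vertically_by_threshold_alt data threshold raw_data
instance (data : List Int) (threshold : Int) (raw_data : Option (List Int)) (out : List Int × List (List Int)) : Decidable (Spec_split_vertically_by_threshold data threshold raw_data out) := by unfold Spec_split_vertically_by_threshold; infer_instance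

-- ===== CLAIM (what is proved, stated in full; the proofs are below) =====
def Claim_equal_split_vertically_by_threshold : Prop := ∀ (data : List Int) (threshold : Int) (raw_data : Option (List Int)), Dom_split_vertically_by_threshold data threshold raw_data → Pre_split_vertically_by_threshold data threshold raw_data → Spec_split_vertically_by_threshold data threshold raw_data (split_vertically_by_threshold data threshold raw_data)

-- ===== LEMMAS AND PROOFS =====

-- reference state machine: crossings and hills of the suffix of data starting at index i
def pvCross (t : Int) (dir : String) (p : Int) : Bool :=
  if dir == "minus" then decide (p > t) else decide (p < t)

def pvFlip (dir : String) : String := if dir == "minus" then "plus" else "minus"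

def pvConsH (ch : List Int) : List (List Int) → List (List Int)
  | [] => [ch]
  | h :: hs => (ch ++ h) :: hs

def pvS (t : Int) : List Int → String → Nat → List Int × List (List Int)
  | [], _, _ => ([], [[]])
  | p :: l, dir, i =>
    if pvCross t dir p then
      let r := pvS t l (pvFlip dir) (i + 1)
      (((i : Int)) :: r.1, [p] :: r.2)
    else
      let r := pvS t l dir (i + 1)
      (r.1, pvConsH [p] r.2)

theorem pvConsH_consH (ch p : List Int) (x : List (List Int)) :
    pvConsH ch (pvConsH p x) = pvConsH (ch ++ p) x := by
  cases x <;> simp [pvConsH]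

theorem pvS_snd_ne_nil (t : Int) (l : List Int) (dir : String) (i : Nat) :
    (pvS t l dir i).2 ≠ [] := by
  cases l with
  | nil => simp [pvS]
  | cons p l =>
    simp only [pvS]
    split
    · simp
    · cases h : (pvS t l dir (i + 1)).2 <;> simp [pvConsH, h]

theorem pvS_idx (t : Int) (l : List Int) (dir : String) (i : Nat) :
    ∀ c ∈ (pvS t l dir i).1, ∃ j : Nat, c = (j : Int) ∧ i ≤ j := by
  induction l generalizing dir i with
  | nil => simp [pvS]
  | cons p l ih =>
    simp only [pvS]
    split
    · intro c hc
      rcases List.mem_cons.1 hc with h | h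
      · exact ⟨i, h, le_refl _⟩
      · obtain ⟨j, hj, hij⟩ := ih (pvFlip dir) (i + 1) c h
        exact ⟨j, hj, by omega⟩
    · intro c hc
      obtain ⟨j, hj, hij⟩ := ih dir (i + 1) c hc
      exact ⟨j, hj, by omega⟩

theorem pvDrop_succ (data l : List Int) (p : Int) (i : Nat)
    (h : data.drop i = p :: l) : data.drop (i + 1) = l := by
  have h1 : data.drop (i + 1) = (data.drop i).drop 1 := by
    rw [List.drop_drop]
  rw [h1, h]; rfl

theorem pvGetD_drop (data l : List Int) (p : Int) (i : Nat)
    (h : data.drop i = p :: l) : data.getD i 0 = p := by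
  have h0 : (data.drop i)[0]? = some p := by rw [h]; rfl
  rw [List.getElem?_drop] at h0
  simp only [Nat.add_zero] at h0
  simp [List.getD_eq_getElem?_getD, h0]

theorem pvCast_succ (i : Nat) : ((i : Int) + 1) = ((i + 1 : Nat) : Int) := by push_cast; ring

-- A's loop, generalized: folding the suffix of data at index i and then closing the
-- last hill equals the reference machine's output appended to the accumulators.
theorem pvA_loop (t : Int) (data : List Int) :
    ∀ (l : List Int) (i : Nat) (cr : List Int) (hl : List (List Int)) (ch : List Int) (dir : String),
    data.drop i = l → (dir = "minus" ∨ dir = "plus") →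
    ((l.foldl (pvStepA data t) (cr, hl, ch, dir, (i : Int))).1,
      (l.foldl (pvStepA data t) (cr, hl, ch, dir, (i : Int))).2.1
        ++ [(l.foldl (pvStepA data t) (cr, hl, ch, dir, (i : Int))).2.2.1])
    = (cr ++ (pvS t l dir i).1, hl ++ pvConsH ch (pvS t l dir i).2) := by
  intro l
  induction l with
  | nil => intro i cr hl ch dir _ _; simp [pvS, pvConsH]
  | cons p l ih =>
    intro i cr hl ch dir hdrop hdir
    have hdrop' : data.drop (i + 1) = l := pvDrop_succ data l p i hdrop
    have hget : PySem.List.pyGetD data (i : Int) 0 = p := by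
      rw [PySem.List.pyGetD_natCast]; exact pvGetD_drop data l p i hdrop
    simp only [List.foldl_cons, pvStepA, hget]
    rcases hdir with rfl | rfl
    · by_cases hp : p > t
      · rw [if_pos (by rfl), if_pos hp, pvCast_succ]
        refine (ih (i + 1) (cr ++ [(i : Int)]) (hl ++ [ch ++ [p]]) [] "plus" hdrop' (Or.inr rfl)).trans ?_
        have hS : pvS t (p :: l) "minus" i
            = ((i : Int) :: (pvS t l "plus" (i + 1)).1, [p] :: (pvS t l "plus" (i + 1)).2) := by
          simp [pvS, pvCross, pvFlip, hp]
        rw [hS]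
        obtain ⟨h, hs, hrest⟩ : ∃ h hs, (pvS t l "plus" (i + 1)).2 = h :: hs := by
          cases hx : (pvS t l "plus" (i + 1)).2 with
          | nil => exact absurd hx (pvS_snd_ne_nil t l "plus" (i + 1))
          | cons h hs => exact ⟨h, hs, rfl⟩
        rw [hrest]
        simp [pvConsH]
      · rw [if_pos (by rfl), if_neg hp, pvCast_succ]
        refine (ih (i + 1) cr hl (ch ++ [p]) "minus" hdrop' (Or.inl rfl)).trans ?_
        have hS : pvS t (p :: l) "minus" i
            = ((pvS t l "minus" (i + 1)).1, pvConsH [p] (pvS t l "minus" (i + 1)).2) := by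
          simp [pvS, pvCross, hp]
        rw [hS, pvConsH_consH]
    · by_cases hp : p < t
      · rw [if_neg (by simp), if_pos (by rfl), if_pos hp, pvCast_succ]
        refine (ih (i + 1) (cr ++ [(i : Int)]) (hl ++ [ch ++ [p]]) [] "minus" hdrop' (Or.inl rfl)).trans ?_
        have hS : pvS t (p :: l) "plus" i
            = ((i : Int) :: (pvS t l "minus" (i + 1)).1, [p] :: (pvS t l "minus" (i + 1)).2) := by
          simp [pvS, pvCross, pvFlip, hp]
        rw [hS]
        obtain ⟨h, hs, hrest⟩ : ∃ h hs, (pvS t l "minus" (i + 1)).2 = h :: hs := by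
          cases hx : (pvS t l "minus" (i + 1)).2 with
          | nil => exact absurd hx (pvS_snd_ne_nil t l "minus" (i + 1))
          | cons h hs => exact ⟨h, hs, rfl⟩
        rw [hrest]
        simp [pvConsH]
      · rw [if_neg (by simp), if_pos (by rfl), if_neg hp, pvCast_succ]
        refine (ih (i + 1) cr hl (ch ++ [p]) "plus" hdrop' (Or.inr rfl)).trans ?_
        have hS : pvS t (p :: l) "plus" i
            = ((pvS t l "plus" (i + 1)).1, pvConsH [p] (pvS t l "plus" (i + 1)).2) := by
          simp [pvS, pvCross, hp]
        rw [hS, pvConsH_consH]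

-- B's first loop computes exactly the reference machine's crossings.
theorem pvB_cross (t : Int) :
    ∀ (l cr : List Int) (dir : String) (i : Nat), (dir = "minus" ∨ dir = "plus") →
    ∃ r : String × Int,
      l.foldl (pvStepB t) (cr, dir, (i : Int)) = (cr ++ (pvS t l dir i).1, r) := by
  intro l
  induction l with
  | nil =>
    intro cr dir i _
    exact ⟨(dir, (i : Int)), by simp [pvS]⟩
  | cons p l ih =>
    intro cr dir i hdir
    simp only [List.foldl_cons, pvStepB]
    rcases hdir with rfl | rfl
    · by_cases hp : p > t
      · rw [if_pos (by simp [hp]), pvCast_succ]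
        obtain ⟨r, hr⟩ := ih (cr ++ [(i : Int)]) "plus" (i + 1) (Or.inr rfl)
        refine ⟨r, hr.trans ?_⟩
        have hS : pvS t (p :: l) "minus" i
            = ((i : Int) :: (pvS t l "plus" (i + 1)).1, [p] :: (pvS t l "plus" (i + 1)).2) := by
          simp [pvS, pvCross, pvFlip, hp]
        rw [hS]; simp
      · rw [if_neg (by simp [hp]), if_neg (by simp), pvCast_succ]
        obtain ⟨r, hr⟩ := ih cr "minus" (i + 1) (Or.inl rfl)
        refine ⟨r, hr.trans ?_⟩
        have hS : pvS t (p :: l) "minus" i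
            = ((pvS t l "minus" (i + 1)).1, pvConsH [p] (pvS t l "minus" (i + 1)).2) := by
          simp [pvS, pvCross, hp]
        rw [hS]
    · by_cases hp : p < t
      · rw [if_neg (by simp), if_pos (by simp [hp]), pvCast_succ]
        obtain ⟨r, hr⟩ := ih (cr ++ [(i : Int)]) "minus" (i + 1) (Or.inl rfl)
        refine ⟨r, hr.trans ?_⟩
        have hS : pvS t (p :: l) "plus" i
            = ((i : Int) :: (pvS t l "minus" (i + 1)).1, [p] :: (pvS t l "minus" (i + 1)).2) := by
          simp [pvS, pvCross, pvFlip, hp]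
        rw [hS]; simp
      · rw [if_neg (by simp), if_neg (by simp [hp]), pvCast_succ]
        obtain ⟨r, hr⟩ := ih cr "plus" (i + 1) (Or.inr rfl)
        refine ⟨r, hr.trans ?_⟩
        have hS : pvS t (p :: l) "plus" i
            = ((pvS t l "plus" (i + 1)).1, pvConsH [p] (pvS t l "plus" (i + 1)).2) := by
          simp [pvS, pvCross, hp]
        rw [hS]

-- the hill fold only appends to its accumulator
theorem pvStepH_acc (rd : List Int) :
    ∀ (cs : List Int) (acc : List (List Int)) (prev : Int),
    cs.foldl (pvStepH rd) (acc, prev)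
      = (acc ++ (cs.foldl (pvStepH rd) ([], prev)).1, (cs.foldl (pvStepH rd) ([], prev)).2) := by
  intro cs
  induction cs with
  | nil => simp
  | cons c cs ih =>
    intro acc prev
    simp only [List.foldl_cons, pvStepH]
    rw [ih ([] ++ [PySem.List.slice rd (some prev) (some (c + 1))]) (c + 1),
        ih (acc ++ [PySem.List.slice rd (some prev) (some (c + 1))]) (c + 1)]
    simp

-- B's second loop (slicing at crossings) rebuilds exactly the reference machine's hills.
theorem pvB_hills (t : Int) (data : List Int) :
    ∀ (l : List Int) (i : Nat) (dir : String), data.drop i = l →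
    ((pvS t l dir i).1.foldl (pvStepH data) ([], (i : Int))).1
      ++ [PySem.List.slice data (some ((pvS t l dir i).1.foldl (pvStepH data) ([], (i : Int))).2) none]
    = (pvS t l dir i).2 := by
  intro l
  induction l with
  | nil =>
    intro i dir hdrop
    simp [pvS, PySem.List.slice_from_natCast, hdrop]
  | cons p l ih =>
    intro i dir hdrop
    have hdrop' : data.drop (i + 1) = l := pvDrop_succ data l p i hdrop
    simp only [pvS]
    split
    · -- crossing at index i: first hill is the one-element slice [p]
      have hone : PySem.List.slice data (some ((i : Nat) : Int)) (some ((i : Int) + 1)) = [p] := by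
        rw [pvCast_succ, PySem.List.slice_natCast, hdrop]
        simp
      simp only [List.foldl_cons, pvStepH, List.nil_append]
      rw [pvStepH_acc data _ [PySem.List.slice data (some ((i : Nat) : Int)) (some ((i : Int) + 1))]]
      rw [hone, pvCast_succ]
      have := ih (i + 1) (pvFlip dir) hdrop'
      simp only [List.cons_append, List.append_assoc]
      rw [this]
      simp
    · -- no crossing: p is consed onto the head of the first hill
      have hthis := ih (i + 1) dir hdrop'
      cases hcs : (pvS t l dir (i + 1)).1 with
      | nil =>
        rw [hcs] at hthis
        simp only [List.foldl_nil, List.nil_append] at hthis ⊢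
        rw [← hthis, PySem.List.slice_from_natCast, PySem.List.slice_from_natCast, hdrop, hdrop']
        simp [pvConsH]
      | cons c cs =>
        obtain ⟨j, rfl, hij⟩ := pvS_idx t l dir (i + 1) c (by rw [hcs]; exact List.mem_cons_self ..)
        rw [hcs] at hthis
        dsimp only
        simp only [List.foldl_cons, pvStepH, List.nil_append] at hthis ⊢
        rw [pvStepH_acc data cs [PySem.List.slice data (some ((i + 1 : Nat) : Int)) (some (((j : Nat) : Int) + 1))] (((j : Nat) : Int) + 1)] at hthis
        rw [pvStepH_acc data cs [PySem.List.slice data (some ((i : Nat) : Int)) (some (((j : Nat) : Int) + 1))] (((j : Nat) : Int) + 1)]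
        have hsl : PySem.List.slice data (some ((i : Nat) : Int)) (some (((j : Nat) : Int) + 1))
            = p :: PySem.List.slice data (some ((i + 1 : Nat) : Int)) (some (((j : Nat) : Int) + 1)) := by
          rw [pvCast_succ j, PySem.List.slice_natCast, PySem.List.slice_natCast, hdrop, hdrop']
          have h2 : j + 1 - i = (j - (i + 1)) + 1 + 1 := by omega
          have h3 : j + 1 - (i + 1) = (j - (i + 1)) + 1 := by omega
          rw [h2, h3]
          simp [List.take_succ_cons]
        rw [hsl, ← hthis]
        simp [pvConsH]

-- ===== VERDICT (by name: the statement is the Claim_ definition above) =====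
theorem split_vertically_by_threshold_spec : Claim_equal_split_vertically_by_threshold := by
  intro data threshold raw_data _ hpre
  unfold Spec_split_vertically_by_threshold
  unfold split_vertically_by_threshold split_vertically_by_threshold_alt
  obtain ⟨hne, hsome⟩ := hpre
  match data, raw_data with
  | [], _ => exact absurd rfl hne
  | _ :: _, none => simp at hsome
  | d0 :: rest, some rdv =>
    simp only
    set t := threshold
    set dta := d0 :: rest with hdta
    set dir0 := if d0 < t then "minus" else "plus" with hdir0
    have hdir : dir0 = "minus" ∨ dir0 = "plus" := by
      rw [hdir0]; split
      · exact Or.inl rfl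
      · exact Or.inr rfl
    have hA := pvA_loop t dta dta 0 [] [] [] dir0 (by simp) hdir
    obtain ⟨r, hBr⟩ := pvB_cross t dta [] dir0 0 hdir
    have hH := pvB_hills t dta dta 0 dir0 (by simp)
    simp only [Nat.cast_zero, List.nil_append] at hA hBr hH
    rw [hBr]
    simp only
    obtain ⟨h, hs, hrest⟩ : ∃ h hs, (pvS t dta dir0 0).2 = h :: hs := by
      cases hx : (pvS t dta dir0 0).2 with
      | nil => exact absurd hx (pvS_snd_ne_nil t dta dir0 0)
      | cons h hs => exact ⟨h, hs, rfl⟩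
    rw [hrest] at hA hH
    simp only [pvConsH, List.nil_append] at hA
    rw [hA, ← hH]
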